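-- pv_equiv track=rewrite | github.com/manjunathshiva/neo4j-workshop-2025 | app/extractors/entity_extractor.py | _find_entity_position
-- ===== SOURCE A (Python) =====
-- from typing import List, Dict, Any, Optional, Set, Tuple
--
-- def _find_entity_position(entity_name: str, text: str) -> Tuple[int, int]:
--     """
--     Find the position of an entity in the original text.
--
--     Args:
--         entity_name: Name of the entity to find
--         text: Original text to search in
--
--     Returns:
--         Tuple of (start_char, end_char) positions
--     """
--     # Try exact match first
--     start_pos = text.find(entity_name)
--     if start_pos != -1:
--         return start_pos, start_pos + len(entity_name)
--
--     # Try case-insensitive match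
--     start_pos = text.lower().find(entity_name.lower())
--     if start_pos != -1:
--         return start_pos, start_pos + len(entity_name)
--
--     # Try partial matches (for cases where LLM extracted part of a longer phrase)
--     words = entity_name.split()
--     if len(words) > 1:
--         for word in words:
--             if len(word) > 3:  # Only search for meaningful words
--                 start_pos = text.find(word)
--                 if start_pos != -1:
--                     return start_pos, start_pos + len(word)
--
--     # Return -1 if not found
--     return -1, -1
-- ===== SOURCE B (Python) =====
-- def _find_entity_position(entity_name, text):
--     """Single left-to-right scan of the text recording the earliest hit of every
--     candidate (exact, case-insensitive, long words) at once, then one priority pick."""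
--     words = entity_name.split()
--     long_words = [w for w in words if len(w) > 3] if len(words) > 1 else []
--     tl, el = text.lower(), entity_name.lower()
--     exact = ci = -1
--     hits = [-1] * len(long_words)
--     for i in range(len(text) + 1):
--         if exact == -1 and text.startswith(entity_name, i):
--             exact = i
--         if ci == -1 and tl.startswith(el, i):
--             ci = i
--         for k, w in enumerate(long_words):
--             if hits[k] == -1 and text.startswith(w, i):
--                 hits[k] = i
--     if exact != -1:
--         return exact, exact + len(entity_name)
--     if ci != -1:
--         return ci, ci + len(entity_name)
--     for k, w in enumerate(long_words):
--         if hits[k] != -1: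
--             return hits[k], hits[k] + len(w)
--     return -1, -1
-- ===== Notes on version B (the rewrite author's own statement) =====
-- stated objective: alternative
-- what changed: Instead of A's staged sequence of find() calls (exact, then lowercased, then per long word), B makes one left-to-right scan over the text positions recording the earliest startswith-hit of every candidate simultaneously in accumulators, then picks the winner by priority.
import Mathlib
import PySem

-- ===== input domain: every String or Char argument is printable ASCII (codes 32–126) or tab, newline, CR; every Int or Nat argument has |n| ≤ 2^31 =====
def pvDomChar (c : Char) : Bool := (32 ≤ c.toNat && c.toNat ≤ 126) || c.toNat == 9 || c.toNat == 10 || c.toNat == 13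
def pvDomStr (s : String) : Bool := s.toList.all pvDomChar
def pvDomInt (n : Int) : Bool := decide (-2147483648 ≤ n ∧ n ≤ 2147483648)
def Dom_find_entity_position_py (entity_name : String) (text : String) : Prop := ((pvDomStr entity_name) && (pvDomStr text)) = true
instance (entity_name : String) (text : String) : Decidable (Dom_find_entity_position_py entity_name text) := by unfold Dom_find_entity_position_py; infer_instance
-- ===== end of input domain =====

-- B replaces A's staged sequence of find() calls by ONE left-to-right scan of the text that
-- records the earliest hit of every candidate (exact, case-insensitive, long words) at once,
-- then a single priority pick (alternative decomposition); return values proved identical.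

-- ===== PORT A =====
-- the 'for word in words' loop of A (falls through to the final 'return -1, -1')
def findWordLoopA (text : String) : List String → Int × Int
  | [] => (-1, -1)
  | w :: ws =>
    if PySem.Str.len w > 3 then
      let p := PySem.Str.find text w
      if p ≠ -1 then (p, p + PySem.Str.len w) else findWordLoopA text ws
    else findWordLoopA text ws

def find_entity_position_py (entity_name : String) (text : String) : Int × Int :=
  let start_pos := PySem.Str.find text entity_name
  if start_pos ≠ -1 then (start_pos, start_pos + PySem.Str.len entity_name)
  else
    let start_pos2 := PySem.Str.find (PySem.Str.lower text) (PySem.Str.lower entity_name)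
    if start_pos2 ≠ -1 then (start_pos2, start_pos2 + PySem.Str.len entity_name)
    else
      let words := PySem.Str.split₀ entity_name
      if words.length > 1 then findWordLoopA text words
      else (-1, -1)

-- ===== PORT B =====
-- 'acc == -1 and hay.startswith(needle, i)' update of one accumulator; for 0 ≤ i ≤ len(hay),
-- Python's hay.startswith(needle, i) is exactly 'needle is a prefix of hay[i:]'.
def hitStep (hay needle : List Char) (acc : Int) (i : Nat) : Int :=
  if acc = -1 ∧ PySem.Chars.startswith (hay.drop i) needle then (i : Int) else acc

-- one iteration of B's scan: the three 'if'-updates of the loop body, on state (exact, ci, hits)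
def scanStep (t tl e el : List Char) (lw : List (List Char))
    (st : Int × Int × List Int) (i : Nat) : Int × Int × List Int :=
  (hitStep t e st.1 i, hitStep tl el st.2.1 i,
   List.zipWith (fun w h => hitStep t w h i) lw st.2.2)

-- B's final 'for k, w in enumerate(long_words): if hits[k] != -1: return …' loop
def pickB : List (List Char × Int) → Int × Int
  | [] => (-1, -1)
  | (w, h) :: rest => if h ≠ -1 then (h, h + (w.length : Int)) else pickB rest

def find_entity_position_py_alt (entity_name : String) (text : String) : Int × Int :=
  let words := PySem.Str.split₀ entity_name
  let lw : List (List Char) :=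
    if words.length > 1 then
      (words.filter (fun w => decide (PySem.Str.len w > 3))).map String.toList
    else []
  let t := text.toList
  let e := entity_name.toList
  let tl := PySem.Chars.lower t
  let el := PySem.Chars.lower e
  let st := (List.range (t.length + 1)).foldl (scanStep t tl e el lw)
              (-1, -1, List.replicate lw.length (-1))
  if st.1 ≠ -1 then (st.1, st.1 + (e.length : Int))
  else if st.2.1 ≠ -1 then (st.2.1, st.2.1 + (e.length : Int))
  else pickB (lw.zip st.2.2)

-- ===== PRECONDITION & SPEC =====
def Spec_find_entity_position_py (entity_name : String) (text : String) (out : Int × Int) : Prop := out = find_entity_position_py_alt entity_name text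
instance (entity_name : String) (text : String) (out : Int × Int) : Decidable (Spec_find_entity_position_py entity_name text out) := by unfold Spec_find_entity_position_py; infer_instance

-- ===== CLAIM (what is proved, stated in full; the proofs are below) =====
def Claim_equal_find_entity_position_py : Prop := ∀ (entity_name : String) (text : String), Dom_find_entity_position_py entity_name text → Spec_find_entity_position_py entity_name text (find_entity_position_py entity_name text)

-- ===== LEMMAS AND PROOFS =====
-- the triple fold decomposes into three independent folds
theorem scan_decomp (t tl e el : List Char) (lw : List (List Char)) :
    ∀ (l : List Nat) (st : Int × Int × List Int),
      l.foldl (scanStep t tl e el lw) st =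
        (l.foldl (hitStep t e) st.1, l.foldl (hitStep tl el) st.2.1,
         l.foldl (fun hs i => List.zipWith (fun w h => hitStep t w h i) lw hs) st.2.2)
  | [], _ => rfl
  | i :: l, st => by simp [List.foldl, scanStep, scan_decomp t tl e el lw l]

theorem zipWith_self_map {α β γ : Type} (f : α → β → γ) (g : α → β) :
    ∀ l : List α, List.zipWith f l (l.map g) = l.map (fun a => f a (g a))
  | [] => rfl
  | a :: l => by simp [zipWith_self_map f g l]

-- the per-word accumulators evolve pointwise
theorem hits_fold (t : List Char) (lw : List (List Char)) :
    ∀ (l : List Nat) (g : List Char → Int),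
      l.foldl (fun hs i => List.zipWith (fun w h => hitStep t w h i) lw hs) (lw.map g) =
        lw.map (fun w => l.foldl (hitStep t w) (g w))
  | [], _ => rfl
  | i :: l, g => by
    simp only [List.foldl, zipWith_self_map (fun w h => hitStep t w h i) g lw]
    exact hits_fold t lw l (fun w => hitStep t w (g w) i)

theorem hitStep_stay (hay needle : List Char) (acc : Int) (h : acc ≠ -1) :
    ∀ l : List Nat, l.foldl (hitStep hay needle) acc = acc
  | [] => rfl
  | i :: l => by simp [List.foldl, hitStep, h, hitStep_stay hay needle acc h l]

theorem hitStep_skip (hay needle : List Char) :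
    ∀ l : List Nat, (∀ i ∈ l, ¬ needle <+: hay.drop i) →
      l.foldl (hitStep hay needle) (-1) = -1
  | [], _ => rfl
  | i :: l, h => by
    simp [List.foldl, hitStep, (PySem.Chars.startswith_iff _ _).not.mpr (h i (by simp))]
    exact hitStep_skip hay needle l (fun j hj => h j (by simp [hj]))

-- the scan's first-hit accumulator computes Python's find
theorem hitStep_reach (hay needle : List Char) (p : Nat)
    (hpfx : needle <+: hay.drop p) (hmin : ∀ i < p, ¬ needle <+: hay.drop i) :
    ∀ (k a : Nat), a ≤ p → p < a + k →
      (List.range' a k).foldl (hitStep hay needle) (-1) = (p : Int)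
  | 0, a, ha, hk => absurd hk (by omega)
  | k + 1, a, ha, hk => by
    rcases eq_or_lt_of_le ha with h | h
    · subst h
      simp [List.range'_succ, hitStep, (PySem.Chars.startswith_iff _ _).mpr hpfx]
      exact hitStep_stay hay needle _ (by omega) _
    · rw [List.range'_succ]
      simp [List.foldl, hitStep, (PySem.Chars.startswith_iff _ _).not.mpr (hmin a h)]
      exact hitStep_reach hay needle p hpfx hmin k (a + 1) (by omega) (by omega)

theorem scan_eq_find (hay needle : List Char) (n : Nat) (hn : hay.length ≤ n) :
    (List.range (n + 1)).foldl (hitStep hay needle) (-1) = PySem.Chars.find hay needle := by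
  rcases eq_or_lt_of_le (PySem.Chars.neg_one_le_find hay needle) with h | h
  · rw [← h]
    apply hitStep_skip
    intro i _ hpfx
    rw [eq_comm] at h
    rw [PySem.Chars.find_eq_neg_one_iff] at h
    exact h ((PySem.Chars.isIn_iff_infix _ _).mp
      ((PySem.Chars.exists_prefix_drop_iff_isIn _ _).mp ⟨i, hpfx⟩))
  · have h0 : 0 ≤ PySem.Chars.find hay needle := by omega
    obtain ⟨hpfx, hmin⟩ := PySem.Chars.find_spec h0
    have hle := PySem.Chars.find_le_length hay needle
    rw [List.range_eq_range']
    rw [hitStep_reach hay needle (PySem.Chars.find hay needle).toNat hpfx hmin (n + 1) 0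
      (by omega) (by omega)]
    omega

-- B's word pick over the scanned hits equals A's word loop
theorem pick_eq (text : String) : ∀ ws : List String,
    pickB ((ws.filter (fun w => decide (3 < w.length))).map
      (fun w => (w.toList, PySem.Chars.find text.toList w.toList))) = findWordLoopA text ws
  | [] => rfl
  | w :: ws => by
    by_cases hw : 3 < w.length
    · by_cases hp : PySem.Chars.find text.toList w.toList = -1 <;>
        simp [findWordLoopA, pickB, hw, hp, pick_eq text ws]
    · simp [findWordLoopA, hw, pick_eq text ws]

theorem zip_self_map {α β : Type} (g : α → β) :
    ∀ l : List α, l.zip (l.map g) = l.map (fun a => (a, g a))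
  | [] => rfl
  | a :: l => by simp [zip_self_map g l]

theorem ports_eq (en text : String) :
    find_entity_position_py en text = find_entity_position_py_alt en text := by
  have hlow : (PySem.Chars.lower text.toList).length = text.toList.length := by
    simp [PySem.Chars.lower]
  have hst : ∀ lw : List (List Char),
      (List.range (text.toList.length + 1)).foldl
        (scanStep text.toList (PySem.Chars.lower text.toList) en.toList
          (PySem.Chars.lower en.toList) lw)
        (-1, -1, List.replicate lw.length (-1)) =
      (PySem.Chars.find text.toList en.toList,
       PySem.Chars.find (PySem.Chars.lower text.toList) (PySem.Chars.lower en.toList),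
       lw.map (fun w => PySem.Chars.find text.toList w)) := by
    intro lw
    rw [scan_decomp]
    refine congrArg₂ Prod.mk ?_ (congrArg₂ Prod.mk ?_ ?_)
    · exact scan_eq_find _ _ _ le_rfl
    · exact scan_eq_find _ _ _ (le_of_eq hlow)
    · rw [show List.replicate lw.length (-1 : Int) = lw.map (fun _ => -1) by simp]
      rw [hits_fold]
      exact List.map_congr_left fun w _ => scan_eq_find _ _ _ le_rfl
  simp only [find_entity_position_py, find_entity_position_py_alt, hst, zip_self_map]
  by_cases hws : (PySem.Str.split₀ en).length > 1
  · simp [pysem, hws, List.map_map]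
    simp only [Function.comp_def, pick_eq text (PySem.Str.split₀ en)]
  · simp [pysem, hws, pickB]

-- ===== VERDICT (by name: the statement is the Claim_ definition above) =====
theorem find_entity_position_py_spec : Claim_equal_find_entity_position_py := by
  intro en text _
  unfold Spec_find_entity_position_py
  exact ports_eq en text
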